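-- pv_equiv track=rewrite | github.com/krsivanov/SoftUni | Python Advanced/Advanced/2-Tuples and Sets/2-avg_student_grades.py | count_student_marks
-- ===== SOURCE A (Python) =====
-- def count_student_marks(values):
--   student_marks = {}
--
--   for value in values:
--     (student, mark) = value.split(" ")
--     if student not in student_marks:
--       student_marks[student]= []
--     student_marks[student].append(mark)
--   return student_marks
-- ===== SOURCE B (Python) =====
-- def count_student_marks(values):
--     pairs = []
--     for value in values:
--         (student, mark) = value.split(" ")
--         pairs.append((student, mark))
--     students = dict.fromkeys(s for s, _ in pairs)
--     return {s: [m for t, m in pairs if t == s] for s in students}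
-- ===== Notes on version B (the rewrite author's own statement) =====
-- stated objective: alternative
-- what changed: A builds the dict in one pass, appending each mark to its student's bucket; B first parses all lines into (student, mark) pairs, then computes the distinct students in first-occurrence order and builds each student's mark list by a comprehension scanning the pair list.
import Mathlib
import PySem

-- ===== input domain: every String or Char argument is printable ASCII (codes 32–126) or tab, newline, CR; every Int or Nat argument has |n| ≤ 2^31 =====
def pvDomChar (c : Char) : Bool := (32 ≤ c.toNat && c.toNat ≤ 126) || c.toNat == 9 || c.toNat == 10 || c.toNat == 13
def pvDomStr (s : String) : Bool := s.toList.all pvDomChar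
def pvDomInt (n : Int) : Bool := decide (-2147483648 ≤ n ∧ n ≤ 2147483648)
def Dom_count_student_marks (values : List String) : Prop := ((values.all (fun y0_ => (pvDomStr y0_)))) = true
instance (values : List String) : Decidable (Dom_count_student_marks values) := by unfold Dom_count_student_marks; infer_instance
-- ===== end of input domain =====

-- B groups by a different decomposition (parse-all, then distinct students, then per-student scans);
-- same return value as A on every input where A returns (no speed claim).

-- shared primitive: the two-part unpack '(student, mark) = value.split(" ")'
-- (the default branch is unreachable under Pre_count_student_marks)
def pvSplit2 (value : String) : String × String :=
  match PySem.Str.split? value " " with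
  | some [s, m] => (s, m)
  | _ => ("", "")

-- ===== PORT A =====
def count_student_marks (values : List String) : List (String × List String) :=
  (values.foldl (fun d value =>
      let p := pvSplit2 value
      let d := if d.contains p.1 then d else d.insert p.1 ([] : List String)
      d.modify p.1 [] (fun l => l ++ [p.2]))
    PySem.Dict.empty).items

-- ===== PORT B =====
def count_student_marks_alt (values : List String) : List (String × List String) :=
  let pairs := values.map pvSplit2
  let students := PySem.List.dedup (pairs.map (fun p => p.1))
  students.map (fun s => (s, (pairs.filter (fun p => p.1 == s)).map (fun p => p.2)))

-- ===== PRECONDITION & SPEC =====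
-- Pre_ excludes exactly the inputs where some line does not split into two space-separated
-- parts: there Python's two-element unpack raises ValueError.
def Pre_count_student_marks (values : List String) : Prop :=
  ∀ v ∈ values, ((PySem.Str.split? v " ").getD []).length = 2
instance (values : List String) : Decidable (Pre_count_student_marks values) := by
  unfold Pre_count_student_marks; infer_instance

def pvWitness_count_student_marks : List String := ["Bob 5", "Ann 6", "Bob 3"]

def Spec_count_student_marks (values : List String) (out : List (String × List String)) : Prop := out = count_student_marks_alt values
instance (values : List String) (out : List (String × List String)) : Decidable (Spec_count_student_marks values out) := by unfold Spec_count_student_marks; infer_instance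

-- ===== CLAIM (what is proved, stated in full; the proofs are below) =====
def Claim_equal_count_student_marks : Prop := ∀ (values : List String), Dom_count_student_marks values → Pre_count_student_marks values → Spec_count_student_marks values (count_student_marks values)

-- ===== LEMMAS AND PROOFS =====

-- an absent key looks up to the default
lemma getD_of_not_contains (d : PySem.Dict String (List String)) (s : String)
    (h : d.contains s = false) : d.getD s [] = [] := by
  have hf : d.items.find? (fun p => p.1 == s) = none := by
    apply List.find?_eq_none.2
    intro p hp
    simp [PySem.Dict.contains] at h
    simpa using h p.1 p.2 hp
  simp [PySem.Dict.getD, PySem.Dict.get?, hf]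

-- A's guarded 'ensure-bucket then append' step is the plain modify step
lemma step_eq (d : PySem.Dict String (List String)) (s m : String) :
    ((if d.contains s then d else d.insert s ([] : List String)).modify s []
        (fun l => l ++ [m]))
      = d.modify s [] (fun l => l ++ [m]) := by
  by_cases h : d.contains s = true
  · simp [h]
  · rw [if_neg (by simp [h])]
    simp only [PySem.Dict.modify]
    rw [PySem.Dict.insert_insert_self]
    have h' : d.contains s = false := by simpa using h
    rw [getD_of_not_contains d s h']
    have : (d.insert s ([] : List String)).getD s [] = [] := by
      simp [PySem.Dict.getD, PySem.Dict.get?_insert_self]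
    rw [this]

-- ===== VERDICT (by name: the statement is the Claim_ definition above) =====
theorem count_student_marks_spec : Claim_equal_count_student_marks := by
  intro values _ _
  unfold Spec_count_student_marks count_student_marks count_student_marks_alt
  have hstep := PySem.List.foldl_congr_mem values
    (fun d value =>
      let p := pvSplit2 value
      let d := if d.contains p.1 then d else d.insert p.1 ([] : List String)
      d.modify p.1 [] (fun l => l ++ [p.2]))
    (fun d value => d.modify (pvSplit2 value).1 [] (fun l => l ++ [(pvSplit2 value).2]))
    PySem.Dict.empty
    (fun acc x _ => step_eq acc (pvSplit2 x).1 (pvSplit2 x).2)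
  rw [hstep]
  have hmap : values.foldl
      (fun d value => d.modify (pvSplit2 value).1 [] (fun l => l ++ [(pvSplit2 value).2]))
      PySem.Dict.empty
    = (values.map pvSplit2).foldl
        (fun d p => d.modify p.1 [] (fun l => l ++ [p.2])) PySem.Dict.empty := by
    rw [List.foldl_map]
  rw [hmap]
  set pairs := values.map pvSplit2 with hpairs
  have hnodup : (pairs.foldl (fun d p => d.modify p.1 [] (fun l => l ++ [p.2]))
      (PySem.Dict.empty : PySem.Dict String (List String))).keys.Nodup :=
    PySem.Dict.nodup_keys_foldl_modify_key pairs (fun p => p.1) []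
      (fun _ p => fun l => l ++ [p.2]) PySem.Dict.empty (by simp [PySem.Dict.empty, PySem.Dict.keys])
  rw [PySem.Dict.items_eq_map_keys _ hnodup []]
  have hkeys : (pairs.foldl (fun d p => d.modify p.1 [] (fun l => l ++ [p.2]))
      (PySem.Dict.empty : PySem.Dict String (List String))).keys
      = PySem.List.dedup (pairs.map (fun p => p.1)) := by
    have := PySem.Dict.keys_foldl_modify_key pairs (fun p => p.1) []
      (fun _ p => fun l => l ++ [p.2]) (PySem.Dict.empty : PySem.Dict String (List String))
    simpa [PySem.Dict.empty, PySem.Dict.keys, PySem.Set.update, PySem.List.dedup,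
      PySem.Set.ofList] using this
  rw [hkeys]
  apply List.map_congr_left
  intro s _
  have hg := PySem.Dict.getD_foldl_modify_append pairs
    (PySem.Dict.empty : PySem.Dict String (List String)) s
  have hempty : (PySem.Dict.empty : PySem.Dict String (List String)).getD s [] = [] := by
    simp [PySem.Dict.getD, PySem.Dict.get?, PySem.Dict.empty]
  rw [hempty] at hg
  simp [hg]
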